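-- pv_equiv track=rewrite | github.com/Scille/parsec-cloud | parsec/core/fs/workspacefs/file_operations.py | locate_range
-- ===== SOURCE A (Python) =====
-- from typing import Tuple, List, Set, Iterator, Union, Sequence, TYPE_CHECKING
--
-- def locate(offset: int, blocksize: int) -> Tuple[int, int]:
--     return divmod(offset, blocksize)
--
-- def locate_range(start: int, stop: int, blocksize: int) -> Iterator[Tuple[int, int, int]]:
--     start_block, _ = locate(start, blocksize)
--     stop_block, _ = locate(stop - 1, blocksize)
--     for block in range(start_block, stop_block + 1):
--         block_start = block * blocksize
--         sub_start = max(start, block_start)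
--         sub_stop = min(stop, block_start + blocksize)
--         yield block, sub_start, sub_stop
-- ===== SOURCE B (Python) =====
-- def locate_range(start, stop, blocksize):
--     # running-cursor decomposition: thread the current position instead of
--     # precomputing the block index range
--     pos = start
--     while pos < stop:
--         block = pos // blocksize
--         sub_stop = min(stop, (block + 1) * blocksize)
--         yield block, pos, sub_stop
--         pos = sub_stop
-- ===== Notes on version B (the rewrite author's own statement) =====
-- stated objective: alternative
-- what changed: Replaces the precomputed block-index range loop (with per-iteration max/min clamping) by a running cursor that yields (pos // blocksize, pos, min(stop, next block boundary)) and advances pos until it reaches stop; Pre_ restricts to blocksize > 0, the function's natural domain (blocksize = 0 raises ZeroDivisionError in both, and on blocksize < 0 A returns accidental values while the cursor loop would not terminate).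
-- intended difference: When start >= stop but start and stop-1 fall in the same block (e.g. (5,5,4)), A yields one degenerate tuple (block, start, stop) covering an empty range, while B yields nothing, which is the intended output for an empty interval [start, stop). — e.g. on locate_range(5, 5, 4): A returns [(1, 5, 5)], B returns []
-- outside the precondition, e.g. on locate_range(0, 1, -4): A returns [(0, 0, -4)], B does not finish within the time limit; on locate_range(0, 1, 0): A raises ZeroDivisionError, B raises ZeroDivisionError
import Mathlib
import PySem

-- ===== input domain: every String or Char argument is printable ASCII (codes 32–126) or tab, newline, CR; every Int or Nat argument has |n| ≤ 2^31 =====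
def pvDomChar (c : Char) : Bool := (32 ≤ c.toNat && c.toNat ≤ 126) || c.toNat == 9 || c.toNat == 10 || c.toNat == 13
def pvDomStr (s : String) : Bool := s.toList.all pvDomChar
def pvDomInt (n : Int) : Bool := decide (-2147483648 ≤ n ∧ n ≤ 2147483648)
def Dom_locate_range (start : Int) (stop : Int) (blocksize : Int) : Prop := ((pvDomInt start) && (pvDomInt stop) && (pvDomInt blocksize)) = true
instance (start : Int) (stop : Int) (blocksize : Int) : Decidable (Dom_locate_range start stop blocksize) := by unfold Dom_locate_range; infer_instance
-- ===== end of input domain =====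

-- B replaces A's precomputed block-index range (with per-iteration max/min clamps) by a
-- running-cursor loop; equivalence is about the returned sequence (both Pythons are generators,
-- compared as lists). Pre_ restricts to blocksize > 0, the natural domain.


-- ===== PORT A =====
-- helper 'locate' = divmod(offset, blocksize); blocksize ≠ 0 is guaranteed by Pre_
def locate (offset : Int) (blocksize : Int) : Int × Int :=
  (PySem.Int.floordiv offset blocksize, PySem.Int.mod offset blocksize)

def locate_range (start : Int) (stop : Int) (blocksize : Int) : List (Int × Int × Int) :=
  (PySem.List.pyRange (locate start blocksize).1 ((locate (stop - 1) blocksize).1 + 1) 1).map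
    (fun block => (block, max start (block * blocksize), min stop (block * blocksize + blocksize)))

-- ===== PORT B =====
-- the while-loop of Source B; fuel (stop - start).toNat bounds the iteration count (each step
-- advances pos by at least 1 when blocksize > 0) and only makes the recursion total
def cursorLoop (stop : Int) (blocksize : Int) : Nat → Int → List (Int × Int × Int)
  | 0, _ => []
  | fuel + 1, pos =>
    if pos < stop then
      let block := PySem.Int.floordiv pos blocksize
      let sub_stop := min stop ((block + 1) * blocksize)
      (block, pos, sub_stop) :: cursorLoop stop blocksize fuel sub_stop
    else []

def locate_range_alt (start : Int) (stop : Int) (blocksize : Int) : List (Int × Int × Int) :=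
  cursorLoop stop blocksize (stop - start).toNat start

-- ===== PRECONDITION & SPEC =====
-- Pre_ restricts to blocksize > 0, the natural domain: blocksize = 0 raises ZeroDivisionError in
-- both programs; on blocksize < 0 A returns accidental floor-division artefacts while B's cursor
-- loop does not terminate.
def Pre_locate_range (start : Int) (stop : Int) (blocksize : Int) : Prop := 0 < blocksize
instance (start : Int) (stop : Int) (blocksize : Int) : Decidable (Pre_locate_range start stop blocksize) := by unfold Pre_locate_range; infer_instance
def pvWitness_locate_range : Int × Int × Int := (3, 11, 4)

-- When start ≥ stop but start and stop-1 fall in the same block, A yields one degenerate tuple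
-- (block, start, stop) covering an empty range, while B yields nothing, the intended output for
-- an empty interval [start, stop).
def D_locate_range (start : Int) (stop : Int) (blocksize : Int) : Prop :=
  0 < blocksize ∧ stop ≤ start ∧
    PySem.Int.floordiv start blocksize = PySem.Int.floordiv (stop - 1) blocksize
instance (start : Int) (stop : Int) (blocksize : Int) : Decidable (D_locate_range start stop blocksize) := by unfold D_locate_range; infer_instance

def Spec_locate_range (start : Int) (stop : Int) (blocksize : Int) (out : List (Int × Int × Int)) : Prop := ¬ D_locate_range start stop blocksize → out = locate_range_alt start stop blocksize
instance (start : Int) (stop : Int) (blocksize : Int) (out : List (Int × Int × Int)) : Decidable (Spec_locate_range start stop blocksize out) := by unfold Spec_locate_range; infer_instance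

def pvDiffWitness_locate_range : Int × Int × Int := (5, 5, 4)
def pvDiffWitnessOut_locate_range : (List (Int × Int × Int)) × (List (Int × Int × Int)) := ([(1, 5, 5)], [])

-- ===== CLAIM (what is proved, stated in full; the proofs are below) =====
def Claim_unchanged_locate_range : Prop := ∀ (start : Int) (stop : Int) (blocksize : Int), Dom_locate_range start stop blocksize → Pre_locate_range start stop blocksize → Spec_locate_range start stop blocksize (locate_range start stop blocksize)
def Claim_changed_locate_range : Prop := Dom_locate_range (pvDiffWitness_locate_range.1) (pvDiffWitness_locate_range.2.1) (pvDiffWitness_locate_range.2.2) ∧ Pre_locate_range (pvDiffWitness_locate_range.1) (pvDiffWitness_locate_range.2.1) (pvDiffWitness_locate_range.2.2) ∧ D_locate_range (pvDiffWitness_locate_range.1) (pvDiffWitness_locate_range.2.1) (pvDiffWitness_locate_range.2.2) ∧ locate_range (pvDiffWitness_locate_range.1) (pvDiffWitness_locate_range.2.1) (pvDiffWitness_locate_range.2.2) = pvDiffWitnessOut_locate_range.1 ∧ locate_range_alt (pvDiffWitness_locate_range.1) (pvDiffWitness_locate_range.2.1) (pvDiffWitness_locate_range.2.2) = pvDiffWitnessOut_locate_range.2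 ∧ pvDiffWitnessOut_locate_range.1 ≠ pvDiffWitnessOut_locate_range.2
def Claim_exact_locate_range : Prop := ∀ (start : Int) (stop : Int) (blocksize : Int), Dom_locate_range start stop blocksize → Pre_locate_range start stop blocksize → D_locate_range start stop blocksize → locate_range start stop blocksize ≠ locate_range_alt start stop blocksize

-- ===== LEMMAS AND PROOFS =====

theorem cursorLoop_stopped (stop blocksize : Int) (fuel : Nat) (pos : Int)
    (h : stop ≤ pos) : cursorLoop stop blocksize fuel pos = [] := by
  cases fuel with
  | zero => rfl
  | succ n => simp [cursorLoop, not_lt.mpr h]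

-- loop invariant: from cursor position pos < stop with enough fuel, the cursor loop produces
-- exactly the blocks from pos's block to (stop-1)'s block, clamped at pos on the left
theorem cursorLoop_eq (stop blocksize : Int) (hb : 0 < blocksize) :
    ∀ (fuel : Nat) (pos : Int), pos < stop → (stop - pos).toNat ≤ fuel →
    cursorLoop stop blocksize fuel pos =
      (PySem.List.pyRange (PySem.Int.floordiv pos blocksize)
        (PySem.Int.floordiv (stop - 1) blocksize + 1) 1).map (fun block =>
          (block, max pos (block * blocksize), min stop (block * blocksize + blocksize))) := by
  intro fuel
  induction fuel with
  | zero => intro pos hlt hfuel; omega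
  | succ n ih =>
    intro pos hlt hfuel
    set k := PySem.Int.floordiv pos blocksize with hk
    have hdm := PySem.Int.floordiv_mul_add_mod pos blocksize
    have hm0 := PySem.Int.mod_nonneg pos (b := blocksize) hb
    have hmlt := PySem.Int.mod_lt pos (b := blocksize) hb
    -- k * blocksize ≤ pos < (k+1) * blocksize
    have hkle : k * blocksize ≤ pos := by rw [hk]; linarith [hdm, hm0]
    have hklt : pos < (k + 1) * blocksize := by
      have h : (k + 1) * blocksize = k * blocksize + blocksize := by ring
      rw [h, hk]; linarith [hdm, hmlt]
    simp only [cursorLoop, if_pos hlt, ← hk]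
    by_cases hcase : (k + 1) * blocksize < stop
    · -- more blocks follow: sub_stop = (k+1)*blocksize
      have hmin : min stop ((k + 1) * blocksize) = (k + 1) * blocksize :=
        min_eq_right (le_of_lt hcase)
      have hnextdiv : PySem.Int.floordiv ((k + 1) * blocksize) blocksize = k + 1 := by
        rw [PySem.Int.floordiv_eq_iff_of_pos hb]
        constructor
        · exact le_refl _
        · nlinarith
      have hstopblk : k + 1 ≤ PySem.Int.floordiv (stop - 1) blocksize := by
        rw [PySem.Int.le_floordiv_iff_mul_le hb]; omega
      have hcons : PySem.List.pyRange k (PySem.Int.floordiv (stop - 1) blocksize + 1) 1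
          = k :: PySem.List.pyRange (k + 1) (PySem.Int.floordiv (stop - 1) blocksize + 1) 1 :=
        PySem.List.pyRange_one_cons (by omega)
      rw [hmin, ih ((k + 1) * blocksize) hcase (by omega), hnextdiv, hcons]
      simp only [List.map_cons]
      congr 1
      · have h1 : max pos (k * blocksize) = pos := max_eq_left hkle
        have h2 : min stop (k * blocksize + blocksize) = (k + 1) * blocksize := by
          rw [show k * blocksize + blocksize = (k + 1) * blocksize by ring]
          exact min_eq_right (le_of_lt hcase)
        rw [h1, h2]
      · apply List.map_congr_left
        intro block hmem
        have hbk : k + 1 ≤ block := (PySem.List.mem_pyRange_one.mp hmem).1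
        have hge : (k + 1) * blocksize ≤ block * blocksize :=
          mul_le_mul_of_nonneg_right hbk (le_of_lt hb)
        have h1 : max ((k + 1) * blocksize) (block * blocksize) = block * blocksize :=
          max_eq_right hge
        have h2 : max pos (block * blocksize) = block * blocksize :=
          max_eq_right (le_trans (le_of_lt hklt) hge)
        rw [h1, h2]
    · -- last block: sub_stop = stop, and (stop-1)'s block is k
      push Not at hcase
      have hmin : min stop ((k + 1) * blocksize) = stop := min_eq_left hcase
      have hstopblk : PySem.Int.floordiv (stop - 1) blocksize = k := by
        rw [PySem.Int.floordiv_eq_iff_of_pos hb]; omega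
      rw [hmin, hstopblk, cursorLoop_stopped _ _ _ _ (le_refl stop),
        PySem.List.pyRange_one_singleton]
      simp only [List.map_cons, List.map_nil]
      have h1 : max pos (k * blocksize) = pos := max_eq_left hkle
      have h2 : min stop (k * blocksize + blocksize) = stop := by
        rw [show k * blocksize + blocksize = (k + 1) * blocksize by ring]
        exact min_eq_left hcase
      rw [h1, h2]

theorem floordiv_mono_of_pos {a b c : Int} (hc : 0 < c) (h : a ≤ b) :
    PySem.Int.floordiv a c ≤ PySem.Int.floordiv b c := by
  rw [PySem.Int.le_floordiv_iff_mul_le hc]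
  have hdm := PySem.Int.floordiv_mul_add_mod a c
  have hm0 := PySem.Int.mod_nonneg a (b := c) hc
  omega

-- ===== VERDICT (by name: the statement is the Claim_ definition above) =====
theorem locate_range_spec : Claim_unchanged_locate_range := by
  intro start stop blocksize _ hpre hnd
  have hb : (0 : Int) < blocksize := hpre
  by_cases hlt : start < stop
  · -- nonempty interval: both sides equal the block decomposition
    unfold locate_range locate_range_alt locate
    dsimp only
    rw [cursorLoop_eq stop blocksize hb _ start hlt (by omega)]
  · -- empty interval outside D_: the two block indices differ, so A's range is empty too
    push Not at hlt
    have hne : PySem.Int.floordiv start blocksize ≠ PySem.Int.floordiv (stop - 1) blocksize := by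
      intro h; exact hnd ⟨hb, hlt, h⟩
    have hle : PySem.Int.floordiv (stop - 1) blocksize ≤ PySem.Int.floordiv start blocksize :=
      floordiv_mono_of_pos hb (by omega)
    unfold locate_range locate_range_alt locate
    dsimp only
    rw [PySem.List.pyRange_one_eq_nil (by omega), List.map_nil,
      cursorLoop_stopped _ _ _ _ hlt]

theorem locate_range_changed : Claim_changed_locate_range := by
  unfold Claim_changed_locate_range; decide

theorem locate_range_tight : Claim_exact_locate_range := by
  intro start stop blocksize _ _ hd
  obtain ⟨hb, hle, heq⟩ := hd
  have hB : locate_range_alt start stop blocksize = [] := by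
    unfold locate_range_alt
    exact cursorLoop_stopped _ _ _ _ hle
  have hA : locate_range start stop blocksize ≠ [] := by
    unfold locate_range locate
    dsimp only
    rw [← heq, PySem.List.pyRange_one_singleton]
    simp
  rw [hB]; exact hA

-- witness satisfies Dom and Pre (referenced so the definition carries its proof obligation)
theorem pvWitness_locate_range_valid :
    Dom_locate_range pvWitness_locate_range.1 pvWitness_locate_range.2.1 pvWitness_locate_range.2.2 ∧
    Pre_locate_range pvWitness_locate_range.1 pvWitness_locate_range.2.1 pvWitness_locate_range.2.2 := by
  decide
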